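-- pv_equiv track=rewrite | github.com/Abiaina/csFunProblems | digitMatch.py | getDigitMatchCount
-- ===== SOURCE A (Python) =====
-- def getDigitMatchCount (num1, num2):
--   digitMatchCount = 0
--     # checks for nil and normalizes numbers
--   if num1 == None or num2 == None:
--       return digitMatchCount
--   if num1 < 0:
--        num1 *= -1
--   if num2 < 0:
--        num2 *= -1
--   if num1 <= num2:
--        min = num1
--   else:
--       min = num2
--
--     # could check for same number here and use log10 to return number of digits that match
--
--   while min > 0:
--     if num1%10 == num2%10:
--       digitMatchCount += 1
--     num1 //= 10
--     num2 //= 10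
--     min //= 10
--
--   return digitMatchCount
-- ===== SOURCE B (Python) =====
-- def getDigitMatchCount(num1, num2):
--     if num1 is None or num2 is None:
--         return 0
--     if num1 == 0 or num2 == 0:
--         return 0
--     s1 = str(abs(num1))
--     s2 = str(abs(num2))
--     return sum(c1 == c2 for c1, c2 in zip(reversed(s1), reversed(s2)))
-- ===== Notes on version B (the rewrite author's own statement) =====
-- stated objective: idiomatic
-- what changed: Replaces the arithmetic digit-peeling while-loop (repeated %10 and //=10 on three variables) with string formatting: count equal characters in zip(reversed(str(abs(num1))), reversed(str(abs(num2)))), with an explicit zero guard matching A's zero-iteration loop when min is 0.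
import Mathlib
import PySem

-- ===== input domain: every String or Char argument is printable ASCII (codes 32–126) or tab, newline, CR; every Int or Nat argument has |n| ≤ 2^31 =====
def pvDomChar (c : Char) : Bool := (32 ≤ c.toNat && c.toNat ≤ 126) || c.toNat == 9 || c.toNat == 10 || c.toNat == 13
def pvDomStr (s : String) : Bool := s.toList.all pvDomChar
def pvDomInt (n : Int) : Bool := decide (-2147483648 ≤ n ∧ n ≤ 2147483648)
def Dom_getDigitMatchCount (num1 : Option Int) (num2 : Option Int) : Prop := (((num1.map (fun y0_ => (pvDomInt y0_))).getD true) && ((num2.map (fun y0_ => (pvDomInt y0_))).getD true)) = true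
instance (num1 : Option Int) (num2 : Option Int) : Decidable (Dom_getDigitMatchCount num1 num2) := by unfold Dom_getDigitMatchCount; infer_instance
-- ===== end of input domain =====

-- B replaces A's arithmetic digit-peeling while-loop with counting equal characters of the
-- zipped reversed decimal strings (idiomatic; same asymptotic cost).

-- ===== PORT A =====
-- the 'while min > 0' loop of A, carrying (num1, num2, min, digitMatchCount)
def pvLoopA (num1 num2 mn acc : Int) : Int :=
  if 0 < mn then
    pvLoopA (PySem.Int.floordiv num1 10) (PySem.Int.floordiv num2 10) (PySem.Int.floordiv mn 10)
      (if PySem.Int.mod num1 10 = PySem.Int.mod num2 10 then acc + 1 else acc)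
  else acc
termination_by mn.toNat
decreasing_by
  have h1 : PySem.Int.floordiv mn 10 = mn / 10 := PySem.Int.floordiv_eq_ediv_of_pos (by omega)
  rw [h1]; omega

def getDigitMatchCount (num1 : Option Int) (num2 : Option Int) : Int :=
  match num1, num2 with
  | none, _ => 0
  | _, none => 0
  | some n1, some n2 =>
    let n1 := if n1 < 0 then n1 * (-1) else n1
    let n2 := if n2 < 0 then n2 * (-1) else n2
    let mn := if n1 ≤ n2 then n1 else n2
    pvLoopA n1 n2 mn 0

-- ===== PORT B =====
def getDigitMatchCount_alt (num1 : Option Int) (num2 : Option Int) : Int :=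
  match num1, num2 with
  | none, _ => 0
  | _, none => 0
  | some n1, some n2 =>
    if n1 = 0 ∨ n2 = 0 then 0
    else
      let s1 := PySem.Int.toChars |n1|
      let s2 := PySem.Int.toChars |n2|
      ((s1.reverse.zip s2.reverse).countP (fun p => p.1 == p.2) : Int)

-- ===== PRECONDITION & SPEC =====
def Spec_getDigitMatchCount (num1 : Option Int) (num2 : Option Int) (out : Int) : Prop := out = getDigitMatchCount_alt num1 num2
instance (num1 : Option Int) (num2 : Option Int) (out : Int) : Decidable (Spec_getDigitMatchCount num1 num2 out) := by unfold Spec_getDigitMatchCount; infer_instance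

-- ===== CLAIM (what is proved, stated in full; the proofs are below) =====
def Claim_equal_getDigitMatchCount : Prop := ∀ (num1 : Option Int) (num2 : Option Int), Dom_getDigitMatchCount num1 num2 → Spec_getDigitMatchCount num1 num2 (getDigitMatchCount num1 num2)

-- ===== LEMMAS AND PROOFS =====

lemma pvDigitChar_inj : ∀ x : Nat, x < 10 → ∀ y : Nat, y < 10 →
    (Nat.digitChar x = Nat.digitChar y ↔ x = y) := by decide

lemma pvCoreSucc (b f n : Nat) (ds : List Char) :
    Nat.toDigitsCore b (f + 1) n ds =
      if n / b = 0 then (n % b).digitChar :: ds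
      else Nat.toDigitsCore b f (n / b) ((n % b).digitChar :: ds) := rfl

lemma pvToDigitsCore_append (b : Nat) : ∀ (f n : Nat) (ds : List Char),
    Nat.toDigitsCore b f n ds = Nat.toDigitsCore b f n [] ++ ds := by
  intro f
  induction f with
  | zero => intro n ds; simp [Nat.toDigitsCore]
  | succ f ih =>
    intro n ds
    rw [pvCoreSucc, pvCoreSucc]
    split
    · simp
    · rw [ih (n / b) [(n % b).digitChar], ih (n / b) ((n % b).digitChar :: ds)]
      simp

lemma pvToDigitsCore_fuel : ∀ (f f' n : Nat), n < f → n < f' →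
    Nat.toDigitsCore 10 f n [] = Nat.toDigitsCore 10 f' n [] := by
  intro f
  induction f with
  | zero => intro f' n h _; omega
  | succ f ih =>
    intro f' n hf hf'
    cases f' with
    | zero => omega
    | succ f' =>
      rw [pvCoreSucc, pvCoreSucc]
      split
      · rfl
      · rename_i hne
        have hn10 : 10 ≤ n := by omega
        rw [pvToDigitsCore_append 10 f (n / 10), pvToDigitsCore_append 10 f' (n / 10),
          ih f' (n / 10) (by omega) (by omega)]

lemma pvToDigits_lt (n : Nat) (_h1 : 0 < n) (h2 : n < 10) :
    Nat.toDigits 10 n = [Nat.digitChar n] := by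
  rw [Nat.toDigits, pvCoreSucc]
  simp [Nat.div_eq_of_lt h2, Nat.mod_eq_of_lt h2]

lemma pvToDigits_ge (n : Nat) (h : 10 ≤ n) :
    Nat.toDigits 10 n = Nat.toDigits 10 (n / 10) ++ [Nat.digitChar (n % 10)] := by
  have hne : n / 10 ≠ 0 := by omega
  obtain ⟨m, rfl⟩ : ∃ m, n = m + 1 := ⟨n - 1, by omega⟩
  rw [Nat.toDigits, pvCoreSucc, if_neg hne,
    pvToDigitsCore_append 10 (m + 1) ((m + 1) / 10), Nat.toDigits,
    pvToDigitsCore_fuel (m + 1) ((m + 1) / 10 + 1) ((m + 1) / 10) (by omega) (by omega)]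

lemma pvRev_cons (n : Nat) (h : 0 < n) :
    ∃ t, (Nat.toDigits 10 n).reverse = Nat.digitChar (n % 10) :: t ∧
      (10 ≤ n → t = (Nat.toDigits 10 (n / 10)).reverse) ∧ (n < 10 → t = []) := by
  by_cases h10 : 10 ≤ n
  · exact ⟨(Nat.toDigits 10 (n / 10)).reverse, by rw [pvToDigits_ge n h10]; simp,
      fun _ => rfl, fun h' => by omega⟩
  · refine ⟨[], ?_, fun h' => by omega, fun _ => rfl⟩
    rw [pvToDigits_lt n h (by omega), Nat.mod_eq_of_lt (by omega)]
    simp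

lemma pvMinDiv (A B : Nat) : min (A / 10) (B / 10) = min A B / 10 := by omega

lemma pvFd (k : Nat) : PySem.Int.floordiv (k : Int) 10 = ((k / 10 : Nat) : Int) := by
  exact_mod_cast PySem.Int.floordiv_natCast k 10

lemma pvMd (k : Nat) : PySem.Int.mod (k : Int) 10 = ((k % 10 : Nat) : Int) := by
  exact_mod_cast PySem.Int.mod_natCast k 10

lemma pvBeqDigitChar (A B : Nat) :
    (Nat.digitChar (A % 10) == Nat.digitChar (B % 10)) = decide (A % 10 = B % 10) := by
  by_cases h : A % 10 = B % 10
  · simp [h]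
  · rw [decide_eq_false h, beq_eq_false_iff_ne]
    exact fun hc => h ((pvDigitChar_inj _ (by omega) _ (by omega)).mp hc)

lemma pvKey : ∀ (M A B : Nat), min A B = M → 0 < A → 0 < B → ∀ acc : Int,
    pvLoopA (A : Int) (B : Int) (M : Int) acc =
      acc + ((((Nat.toDigits 10 A).reverse.zip (Nat.toDigits 10 B).reverse).countP
        (fun p => p.1 == p.2) : Nat) : Int) := by
  intro M
  induction M using Nat.strong_induction_on with
  | _ M IH =>
    intro A B hmin hA hB acc
    have hM : 0 < M := by omega
    rw [pvLoopA, if_pos (by exact_mod_cast hM), pvFd, pvFd, pvFd, pvMd, pvMd]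
    obtain ⟨tA, hAeq, hAge, hAlt⟩ := pvRev_cons A hA
    obtain ⟨tB, hBeq, hBge, hBlt⟩ := pvRev_cons B hB
    rw [hAeq, hBeq]
    by_cases h10 : 10 ≤ M
    · -- both numbers still have more digits: recurse on the quotients
      have hA10 : 10 ≤ A := by omega
      have hB10 : 10 ≤ B := by omega
      rw [hAge hA10, hBge hB10]
      rw [IH (M / 10) (by omega) (A / 10) (B / 10)
        (by rw [pvMinDiv, hmin]) (by omega) (by omega) _]
      simp only [List.zip_cons_cons, List.countP_cons, pvBeqDigitChar]
      by_cases hAB : A % 10 = B % 10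
      · rw [if_pos (by exact_mod_cast hAB)]
        simp [hAB]; ring
      · rw [if_neg (fun hc => hAB (by exact_mod_cast hc))]
        simp [hAB]
    · -- min has a single digit: the zipped tail is empty, loop stops next round
      have hM0 : M / 10 = 0 := by omega
      rw [hM0]
      rw [pvLoopA, if_neg (by simp)]
      have hz : tA.zip tB = [] := by
        rcases Nat.le_total A B with h | h
        · rw [hAlt (by omega)]; rfl
        · rw [hBlt (by omega)]; simp
      simp only [List.zip_cons_cons, hz, List.countP_cons, List.countP_nil, pvBeqDigitChar]
      by_cases hAB : A % 10 = B % 10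
      · rw [if_pos (by exact_mod_cast hAB)]
        simp [hAB]
      · rw [if_neg (fun hc => hAB (by exact_mod_cast hc))]
        simp [hAB]

lemma pvAbsIf (a : Int) : (if a < 0 then a * (-1) else a) = |a| := by
  split_ifs with h
  · rw [abs_of_neg h]; ring
  · rw [abs_of_nonneg (by omega)]

lemma pvToChars_natCast (A : Nat) : PySem.Int.toChars (A : Int) = Nat.toDigits 10 A := by
  simp [PySem.Int.toChars]

lemma pvLoopA_zero (a b acc : Int) : pvLoopA a b 0 acc = acc := by
  rw [pvLoopA]; simp

-- ===== VERDICT (by name: the statement is the Claim_ definition above) =====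
theorem getDigitMatchCount_spec : Claim_equal_getDigitMatchCount := by
  intro num1 num2 _
  unfold Spec_getDigitMatchCount
  match num1, num2 with
  | none, _ => rfl
  | some n1, none => rfl
  | some n1, some n2 =>
    show pvLoopA _ _ _ 0 = _
    rw [pvAbsIf, pvAbsIf]
    by_cases h1 : n1 = 0
    · subst h1
      simp [getDigitMatchCount_alt, pvLoopA_zero]
    · by_cases h2 : n2 = 0
      · subst h2
        have habs : ¬ (|n1| ≤ |(0:Int)|) := by
          have := abs_pos.mpr h1; rw [abs_zero]; omega
        simp only [abs_zero]
        simp [getDigitMatchCount_alt, h1, pvLoopA_zero]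
      · have hA : 0 < n1.natAbs := by omega
        have hB : 0 < n2.natAbs := by omega
        have e1 : |n1| = (n1.natAbs : Int) := Int.abs_eq_natAbs n1
        have e2 : |n2| = (n2.natAbs : Int) := Int.abs_eq_natAbs n2
        have emin : (if |n1| ≤ |n2| then |n1| else |n2|) = ((min n1.natAbs n2.natAbs : Nat) : Int) := by
          rw [e1, e2]; split_ifs with h <;> omega
        rw [emin, e1, e2, pvKey (min n1.natAbs n2.natAbs) n1.natAbs n2.natAbs rfl hA hB 0]
        simp only [getDigitMatchCount_alt, h1, h2, or_self]
        rw [e1, e2, pvToChars_natCast, pvToChars_natCast]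
        simp
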